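-- pv_equiv track=rewrite | github.com/Arctic-Voxel/CPS-SmartCard | card.py | find_used_fare
-- ===== SOURCE A (Python) =====
-- MAX_FARE_LOOKUP = {'A': 680, 'B': 590, 'C': 510, 'D': 480, 'E': 380, 'F': 420, 'G': 570, 'H': 680}
--
-- FARE_LOOKUP = {'A': 90, 'B': 80, 'C': 30, 'D': 100, 'E': 120, 'F': 150, 'G': 110, 'H': 0}
--
-- REVERSE_FARE_LOOKUP = {'H': 110, 'G': 150, 'F': 120, 'E': 100, 'D': 30, 'C': 80, 'B': 90, 'A': 0}
--
-- def find_used_fare(source_station, dest_station):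
--     """ Gets and return the fare value used based on source to destination stations. """
--     fare = 0
--     if source_station == dest_station:
--         fare = MAX_FARE_LOOKUP[source_station]
--         return fare
--     if source_station < dest_station:
--         stations = list(FARE_LOOKUP)
--         source_index = stations.index(source_station)
--         dest_index = stations.index(dest_station)
--         for station in stations[source_index: dest_index]:
--             fare += FARE_LOOKUP[station]
--         return fare
--     if dest_station < source_station:
--         stations = list(REVERSE_FARE_LOOKUP)
--         source_index = stations.index(source_station)
--         dest_index = stations.index(dest_station)
--         for station in stations[source_index: dest_index]:
--             fare += REVERSE_FARE_LOOKUP[station]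
--         return fare
-- ===== SOURCE B (Python) =====
-- MAX_FARE_LOOKUP = {'A': 680, 'B': 590, 'C': 510, 'D': 480, 'E': 380, 'F': 420, 'G': 570, 'H': 680}
--
-- # Stations in order, and prefix sums of the forward / reverse per-segment fares:
-- # _P_FWD[i] = fare from 'A' up to station i; _P_REV[i] = fare from 'H' down, i steps.
-- _STATIONS = ['A', 'B', 'C', 'D', 'E', 'F', 'G', 'H']
-- _P_FWD = [0, 90, 170, 200, 300, 420, 570, 680]
-- _P_REV = [0, 110, 260, 380, 480, 510, 590, 680]
--
-- def find_used_fare(source_station, dest_station):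
--     """ Gets and return the fare value used based on source to destination stations. """
--     if source_station == dest_station:
--         return MAX_FARE_LOOKUP[source_station]
--     i = _STATIONS.index(source_station)
--     j = _STATIONS.index(dest_station)
--     if source_station < dest_station:
--         return _P_FWD[j] - _P_FWD[i]
--     return _P_REV[7 - j] - _P_REV[7 - i]
-- ===== Notes on version B (the rewrite author's own statement) =====
-- stated objective: faster
-- what changed: Replaces the per-segment summation loop over a dict slice with precomputed prefix-sum tables: each fare is now a single subtraction of two table entries.
import Mathlib
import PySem

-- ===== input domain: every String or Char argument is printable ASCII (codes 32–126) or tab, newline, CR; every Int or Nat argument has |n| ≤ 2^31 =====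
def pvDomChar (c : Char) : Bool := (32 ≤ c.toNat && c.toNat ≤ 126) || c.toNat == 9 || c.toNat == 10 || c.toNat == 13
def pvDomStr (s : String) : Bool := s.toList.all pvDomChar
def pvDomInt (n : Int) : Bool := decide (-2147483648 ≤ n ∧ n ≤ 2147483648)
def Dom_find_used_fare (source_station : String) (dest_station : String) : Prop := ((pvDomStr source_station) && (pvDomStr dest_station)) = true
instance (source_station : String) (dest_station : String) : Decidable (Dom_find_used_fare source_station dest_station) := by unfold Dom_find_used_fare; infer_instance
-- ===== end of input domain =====

-- B replaces A's per-segment summation loop with precomputed prefix-sum tables (one subtraction per call).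

-- ===== PORT A =====
def MAX_FARE_LOOKUP : PySem.Dict String Int :=
  PySem.Dict.ofList [("A", 680), ("B", 590), ("C", 510), ("D", 480), ("E", 380), ("F", 420), ("G", 570), ("H", 680)]

def FARE_LOOKUP : PySem.Dict String Int :=
  PySem.Dict.ofList [("A", 90), ("B", 80), ("C", 30), ("D", 100), ("E", 120), ("F", 150), ("G", 110), ("H", 0)]

def REVERSE_FARE_LOOKUP : PySem.Dict String Int :=
  PySem.Dict.ofList [("H", 110), ("G", 150), ("F", 120), ("E", 100), ("D", 30), ("C", 80), ("B", 90), ("A", 0)]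

-- literal port of A; where Python raises (KeyError/ValueError on unknown stations, excluded by Pre_) the port returns 0
def find_used_fare (source_station : String) (dest_station : String) : Int :=
  if source_station == dest_station then
    (PySem.Dict.get? MAX_FARE_LOOKUP source_station).getD 0      -- KeyError excluded by Pre_
  else if source_station.toList < dest_station.toList then  -- Python str '<' = Lean < on toList (PYSEM.md)
    let stations := PySem.Dict.keys FARE_LOOKUP
    match PySem.List.index? stations source_station, PySem.List.index? stations dest_station with
    | some source_index, some dest_index =>
        (PySem.List.slice stations (some (source_index : Int)) (some (dest_index : Int))).foldl
          (fun fare station => fare + (PySem.Dict.get? FARE_LOOKUP station).getD 0) 0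
    | _, _ => 0                                                   -- ValueError excluded by Pre_
  else if dest_station.toList < source_station.toList then
    let stations := PySem.Dict.keys REVERSE_FARE_LOOKUP
    match PySem.List.index? stations source_station, PySem.List.index? stations dest_station with
    | some source_index, some dest_index =>
        (PySem.List.slice stations (some (source_index : Int)) (some (dest_index : Int))).foldl
          (fun fare station => fare + (PySem.Dict.get? REVERSE_FARE_LOOKUP station).getD 0) 0
    | _, _ => 0
  else 0                                                          -- unreachable: strings are totally ordered

-- ===== PORT B =====
def pvB_MAX_FARE_LOOKUP : PySem.Dict String Int :=
  PySem.Dict.ofList [("A", 680), ("B", 590), ("C", 510), ("D", 480), ("E", 380), ("F", 420), ("G", 570), ("H", 680)]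

def pvB_STATIONS : List String := ["A", "B", "C", "D", "E", "F", "G", "H"]
def pvB_P_FWD : List Int := [0, 90, 170, 200, 300, 420, 570, 680]
def pvB_P_REV : List Int := [0, 110, 260, 380, 480, 510, 590, 680]

def find_used_fare_alt (source_station : String) (dest_station : String) : Int :=
  if source_station == dest_station then
    (PySem.Dict.get? pvB_MAX_FARE_LOOKUP source_station).getD 0
  else
    (((PySem.List.index? pvB_STATIONS source_station).bind (fun i =>
      (PySem.List.index? pvB_STATIONS dest_station).map (fun j =>
        if source_station.toList < dest_station.toList then
          (PySem.List.pyGet? pvB_P_FWD (j : Int)).getD 0 - (PySem.List.pyGet? pvB_P_FWD (i : Int)).getD 0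
        else
          (PySem.List.pyGet? pvB_P_REV ((7 : Int) - (j : Int))).getD 0 -
          (PySem.List.pyGet? pvB_P_REV ((7 : Int) - (i : Int))).getD 0))).getD 0)

-- ===== PRECONDITION & SPEC =====
-- Pre_ admits exactly the known stations; on any other input A raises (KeyError or ValueError).
def Pre_find_used_fare (source_station : String) (dest_station : String) : Prop :=
  source_station ∈ ["A", "B", "C", "D", "E", "F", "G", "H"] ∧
  dest_station ∈ ["A", "B", "C", "D", "E", "F", "G", "H"]
instance (source_station : String) (dest_station : String) : Decidable (Pre_find_used_fare source_station dest_station) := by unfold Pre_find_used_fare; infer_instance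

def pvWitness_find_used_fare : String × String := ("B", "G")

def Spec_find_used_fare (source_station : String) (dest_station : String) (out : Int) : Prop := out = find_used_fare_alt source_station dest_station
instance (source_station : String) (dest_station : String) (out : Int) : Decidable (Spec_find_used_fare source_station dest_station out) := by unfold Spec_find_used_fare; infer_instance

-- ===== CLAIM (what is proved, stated in full; the proofs are below) =====
def Claim_equal_find_used_fare : Prop := ∀ (source_station : String) (dest_station : String), Dom_find_used_fare source_station dest_station → Pre_find_used_fare source_station dest_station → Spec_find_used_fare source_station dest_station (find_used_fare source_station dest_station)

-- ===== LEMMAS AND PROOFS =====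

-- ===== VERDICT (by name: the statement is the Claim_ definition above) =====
theorem find_used_fare_spec : Claim_equal_find_used_fare := by
  intro s d _ hpre
  obtain ⟨hs, hd⟩ := hpre
  fin_cases hs <;> fin_cases hd <;> decide
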